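-- pv_equiv track=rewrite | github.com/tipdaddy78/advent_of_code | 2021/day3.py | get_bit_counts
-- ===== SOURCE A (Python) =====
-- def get_bit_counts(strings, index=-1):
--     bit_counts = dict()
--     for string in strings:
--         b_string = string.strip()
--         if index == -1:
--             for j in range(len(b_string)):
--                 b_counts = bit_counts.get(j, [0, 0])
--                 if b_string[j] == '0':
--                     b_counts[0] += 1
--                 else:
--                     b_counts[1] += 1
--                 bit_counts[j] = b_counts
--         else:
--             b_counts = bit_counts.get(index, [0, 0])
--             if b_string[index] == '0':
--                 b_counts[0] += 1
--             else:
--                 b_counts[1] += 1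
--             bit_counts[index] = b_counts
--     return bit_counts
-- ===== SOURCE B (Python) =====
-- def get_bit_counts(strings, index=-1):
--     stripped = [s.strip() for s in strings]
--     if index != -1:
--         if not stripped:
--             return {}
--         zeros = 0
--         ones = 0
--         for s in stripped:
--             if s[index] == '0':
--                 zeros += 1
--             else:
--                 ones += 1
--         return {index: [zeros, ones]}
--     maxlen = 0
--     for s in stripped:
--         maxlen = max(maxlen, len(s))
--     return {j: [sum(1 for s in stripped if j < len(s) and s[j] == '0'),
--                 sum(1 for s in stripped if j < len(s) and s[j] != '0')]
--             for j in range(maxlen)}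
-- ===== Notes on version B (the rewrite author's own statement) =====
-- stated objective: alternative
-- what changed: B strips all strings once, then for index==-1 builds the table column-major (precomputed maxlen, then per-column counts) instead of A's row-major per-string dict accumulation, and for index!=-1 keeps two scalar counters in one pass instead of a dict
import Mathlib
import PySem

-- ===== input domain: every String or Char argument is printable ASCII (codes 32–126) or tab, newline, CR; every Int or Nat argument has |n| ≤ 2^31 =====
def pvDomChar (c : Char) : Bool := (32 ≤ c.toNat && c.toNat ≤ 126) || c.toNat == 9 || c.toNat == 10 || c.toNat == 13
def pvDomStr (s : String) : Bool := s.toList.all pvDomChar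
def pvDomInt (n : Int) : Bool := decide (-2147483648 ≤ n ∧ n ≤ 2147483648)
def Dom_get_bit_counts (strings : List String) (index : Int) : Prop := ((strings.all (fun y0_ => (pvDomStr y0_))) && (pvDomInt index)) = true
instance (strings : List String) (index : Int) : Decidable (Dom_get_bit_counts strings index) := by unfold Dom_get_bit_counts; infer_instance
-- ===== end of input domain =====

-- B replaces A's row-major dict accumulation by a stripped-once, column-major tally over a
-- precomputed maximum length (objective: alternative decomposition, same asymptotic cost).

-- ===== PORT A =====
-- b_counts[0] += 1 / b_counts[1] += 1 on the two-element list [zeros, ones]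
def pvBump (c : List Int) (is0 : Bool) : List Int :=
  if is0 then [PySem.List.pyGetD c 0 0 + 1, PySem.List.pyGetD c 1 0]
  else [PySem.List.pyGetD c 0 0, PySem.List.pyGetD c 1 0 + 1]

-- literal port of A; b_string[index] raising IndexError is excluded by Pre_ (pyGet? = none lands
-- in the else branch there, outside the claim)
def get_bit_counts (strings : List String) (index : Int) : List (Int × List Int) :=
  (strings.foldl
    (fun (d : PySem.Dict Int (List Int)) string =>
      let b := PySem.Str.strip string
      if index = -1 then
        (PySem.List.pyRange 0 (PySem.Str.len b) 1).foldl
          (fun d j => d.insert j (pvBump (d.getD j [0, 0]) (PySem.Str.pyGet? b j == some '0')))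
          d
      else
        d.insert index (pvBump (d.getD index [0, 0]) (PySem.Str.pyGet? b index == some '0')))
    PySem.Dict.empty).items

-- ===== PORT B =====
def get_bit_counts_alt (strings : List String) (index : Int) : List (Int × List Int) :=
  let stripped := strings.map PySem.Str.strip
  if index ≠ -1 then
    if stripped.isEmpty then []
    else
      let zo := stripped.foldl
        (fun (p : Int × Int) s =>
          if PySem.Str.pyGet? s index == some '0' then (p.1 + 1, p.2) else (p.1, p.2 + 1))
        (0, 0)
      [(index, [zo.1, zo.2])]
  else
    let maxlen := stripped.foldl (fun m s => max m s.toList.length) 0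
    (List.range maxlen).map (fun (j : Nat) =>
      ((j : Int),
        [((stripped.filter (fun s => decide (j < s.toList.length) && (PySem.Str.pyGet? s (j : Int) == some '0'))).length : Int),
         ((stripped.filter (fun s => decide (j < s.toList.length) && !(PySem.Str.pyGet? s (j : Int) == some '0'))).length : Int)]))

-- ===== PRECONDITION & SPEC =====
-- Pre_ excludes exactly the inputs where A raises IndexError: index ≠ -1 and some stripped
-- string is too short for Python indexing s[index].
def Pre_get_bit_counts (strings : List String) (index : Int) : Prop :=
  index ≠ -1 → ∀ s ∈ strings, PySem.Raise.InRange (PySem.Str.strip s).toList.length index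

instance (strings : List String) (index : Int) : Decidable (Pre_get_bit_counts strings index) := by
  unfold Pre_get_bit_counts; infer_instance

def pvWitness_get_bit_counts : List String × Int := ([" 0110 ", "1010", "001"], -1)

def Spec_get_bit_counts (strings : List String) (index : Int) (out : List (Int × List Int)) : Prop := out = get_bit_counts_alt strings index
instance (strings : List String) (index : Int) (out : List (Int × List Int)) : Decidable (Spec_get_bit_counts strings index out) := by unfold Spec_get_bit_counts; infer_instance

-- ===== CLAIM (what is proved, stated in full; the proofs are below) =====
def Claim_equal_get_bit_counts : Prop := ∀ (strings : List String) (index : Int), Dom_get_bit_counts strings index → Pre_get_bit_counts strings index → Spec_get_bit_counts strings index (get_bit_counts strings index)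

-- ===== LEMMAS AND PROOFS =====

-- the index = -1 step of A's outer loop (the inner loop over one stripped string)
def pvStepA (d : PySem.Dict Int (List Int)) (s : String) : PySem.Dict Int (List Int) :=
  (PySem.List.pyRange 0 (PySem.Str.len (PySem.Str.strip s)) 1).foldl
    (fun d j => d.insert j (pvBump (d.getD j [0, 0]) (PySem.Str.pyGet? (PySem.Str.strip s) j == some '0')))
    d

-- per-column predicates: "this stripped string contributes a zero / a one at column j"
def pvPZ (j : Int) (s : String) : Bool :=
  decide (0 ≤ j) && decide (j < ((PySem.Str.strip s).toList.length : Int)) &&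
    (PySem.Str.pyGet? (PySem.Str.strip s) j == some '0')
def pvPO (j : Int) (s : String) : Bool :=
  decide (0 ≤ j) && decide (j < ((PySem.Str.strip s).toList.length : Int)) &&
    !(PySem.Str.pyGet? (PySem.Str.strip s) j == some '0')

def pvZ (l : List String) (j : Int) : Int := (l.countP (pvPZ j) : Int)
def pvO (l : List String) (j : Int) : Int := (l.countP (pvPO j) : Int)

lemma pvBump_pair (z o : Int) (c : Bool) : pvBump [z, o] c = if c then [z + 1, o] else [z, o + 1] := by
  cases c <;> simp [pvBump, PySem.List.pyGetD, PySem.List.pyGet?, PySem.List.pyIdx?]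

lemma pv_inner_getD (b : String) (j : Int) :
    ∀ (n : Nat) (a : Int) (d : PySem.Dict Int (List Int)), 0 ≤ a →
      (((b.toList.length : Int) - a).toNat = n) →
      ((PySem.List.pyRange a (PySem.Str.len b) 1).foldl
        (fun d j => d.insert j (pvBump (d.getD j [0, 0]) (PySem.Str.pyGet? b j == some '0'))) d).getD j [0, 0]
      = if a ≤ j ∧ j < (b.toList.length : Int)
          then pvBump (d.getD j [0, 0]) (PySem.Str.pyGet? b j == some '0')
          else d.getD j [0, 0] := by
  intro n
  induction n with
  | zero =>
    intro a d ha hn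
    have hba : (b.toList.length : Int) ≤ a := by omega
    rw [show PySem.Str.len b = (b.toList.length : Int) by simp,
        PySem.List.pyRange_one_eq_nil hba]
    simp only [List.foldl_nil]
    rw [if_neg (by omega)]
  | succ n ih =>
    intro a d ha hn
    have hab : a < (b.toList.length : Int) := by
      have : PySem.Str.len b = (b.toList.length : Int) := by simp
      omega
    rw [show PySem.Str.len b = (b.toList.length : Int) by simp] at ih ⊢
    rw [PySem.List.pyRange_one_cons hab]
    simp only [List.foldl_cons]
    have h1 : (0 : Int) ≤ a + 1 := by omega
    have h2 : ((b.toList.length : Int) - (a + 1)).toNat = n := by omega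
    rw [ih (a + 1) (d.insert a (pvBump (d.getD a [0, 0]) (PySem.Str.pyGet? b a == some '0'))) h1 h2]
    rw [PySem.Dict.getD_insert]
    by_cases hja : j = a
    · subst hja
      rw [if_neg (by omega), if_pos rfl, if_pos ⟨le_refl _, hab⟩]
    · by_cases hj1 : a + 1 ≤ j ∧ j < (b.toList.length : Int)
      · rw [if_pos hj1, if_neg hja, if_pos ⟨by omega, hj1.2⟩]
      · rw [if_neg hj1, if_neg hja, if_neg (by omega)]

lemma pv_stepA_getD (s : String) (d : PySem.Dict Int (List Int)) (j : Int) :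
    (pvStepA d s).getD j [0, 0]
    = if 0 ≤ j ∧ j < (((PySem.Str.strip s).toList.length : Nat) : Int)
        then pvBump (d.getD j [0, 0]) (PySem.Str.pyGet? (PySem.Str.strip s) j == some '0')
        else d.getD j [0, 0] := by
  exact pv_inner_getD (PySem.Str.strip s) j ((PySem.Str.strip s).toList.length) 0 d le_rfl (by omega)

lemma pv_outer_getD (j : Int) :
    ∀ (l : List String) (d : PySem.Dict Int (List Int)) (x y : Int), d.getD j [0, 0] = [x, y] →
      (l.foldl pvStepA d).getD j [0, 0] = [x + pvZ l j, y + pvO l j] := by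
  intro l
  induction l with
  | nil => intro d x y h; simp [pvZ, pvO, h]
  | cons s t ih =>
    intro d x y h
    simp only [List.foldl_cons]
    by_cases hc : 0 ≤ j ∧ j < (((PySem.Str.strip s).toList.length : Nat) : Int)
    · by_cases h0 : (PySem.Str.pyGet? (PySem.Str.strip s) j == some '0') = true
      · have hz : pvPZ j s = true := by
          simp only [pvPZ, Bool.and_eq_true, decide_eq_true_eq]; exact ⟨⟨hc.1, hc.2⟩, h0⟩
        have ho : pvPO j s = false := by
          simp only [pvPO, h0, Bool.not_true, Bool.and_false]
        rw [ih (pvStepA d s) (x + 1) y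
          (by rw [pv_stepA_getD, if_pos hc, h, pvBump_pair, if_pos h0])]
        simp only [pvZ, pvO, List.countP_cons, hz, ho, if_true, List.cons.injEq]
        constructor <;> (try simp) <;> (try ring)
      · rw [Bool.not_eq_true] at h0
        have hz : pvPZ j s = false := by
          simp only [pvPZ, h0, Bool.and_false]
        have ho : pvPO j s = true := by
          simp only [pvPO, h0, Bool.not_false, Bool.and_true, Bool.and_eq_true, decide_eq_true_eq]
          exact ⟨hc.1, hc.2⟩
        rw [ih (pvStepA d s) x (y + 1)
          (by rw [pv_stepA_getD, if_pos hc, h, pvBump_pair, if_neg (by simp only [h0]; decide)])]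
        simp only [pvZ, pvO, List.countP_cons, hz, ho, if_true, List.cons.injEq]
        constructor <;> (try simp) <;> (try ring)
    · have hz : pvPZ j s = false := by
        rw [← Bool.not_eq_true]
        simp only [pvPZ, Bool.and_eq_true, decide_eq_true_eq]
        rintro ⟨⟨h1, h2⟩, -⟩; exact hc ⟨h1, h2⟩
      have ho : pvPO j s = false := by
        rw [← Bool.not_eq_true]
        simp only [pvPO, Bool.and_eq_true, decide_eq_true_eq]
        rintro ⟨⟨h1, h2⟩, -⟩; exact hc ⟨h1, h2⟩
      rw [ih (pvStepA d s) x y (by rw [pv_stepA_getD, if_neg hc, h])]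
      simp only [pvZ, pvO, List.countP_cons, hz, ho, List.cons.injEq]
      constructor <;> simp

lemma pv_stepA_keys (d : PySem.Dict Int (List Int)) (s : String) :
    (pvStepA d s).keys
    = PySem.Set.update d.keys (PySem.List.pyRange 0 (PySem.Str.len (PySem.Str.strip s)) 1) := by
  exact PySem.Dict.keys_foldl_insert _ _ _

lemma pv_stepA_nodup (d : PySem.Dict Int (List Int)) (s : String) (h : d.keys.Nodup) :
    (pvStepA d s).keys.Nodup := by
  exact PySem.Dict.nodup_keys_foldl_insert _ _ _ h

lemma pv_set_update_range (m : Nat) :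
    ∀ (n : Nat), PySem.Set.update (PySem.List.pyRange 0 (m : Int) 1) (PySem.List.pyRange 0 (n : Int) 1)
      = PySem.List.pyRange 0 ((max m n : Nat) : Int) 1 := by
  intro n
  induction n with
  | zero =>
    rw [show ((0 : Nat) : Int) = 0 by simp, PySem.List.pyRange_one_eq_nil le_rfl]
    rw [PySem.Set.update_nil, Nat.max_zero]
  | succ n ih =>
    rw [show ((n + 1 : Nat) : Int) = (n : Int) + 1 by push_cast; ring,
        PySem.List.pyRange_one_succ_right (by omega), PySem.Set.update_append, ih,
        PySem.Set.update_cons, PySem.Set.update_nil]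
    by_cases hnm : n < m
    · rw [PySem.Set.add_of_mem (by rw [PySem.List.mem_pyRange_one]; omega)]
      have : max m n = max m (n + 1) := by omega
      rw [this]
    · rw [PySem.Set.add_of_not_mem (by rw [PySem.List.mem_pyRange_one]; omega)]
      have h1 : max m n = n := by omega
      have h2 : max m (n + 1) = n + 1 := by omega
      rw [h1, h2, show ((n + 1 : Nat) : Int) = (n : Int) + 1 by push_cast; ring,
          PySem.List.pyRange_one_succ_right (by omega)]

lemma pv_outer_keys :
    ∀ (l : List String) (d : PySem.Dict Int (List Int)) (m : Nat),
      d.keys = PySem.List.pyRange 0 (m : Int) 1 →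
      (l.foldl pvStepA d).keys
      = PySem.List.pyRange 0 ((l.foldl (fun acc s => max acc (PySem.Str.strip s).toList.length) m : Nat) : Int) 1 := by
  intro l
  induction l with
  | nil => intro d m h; simpa using h
  | cons s t ih =>
    intro d m h
    simp only [List.foldl_cons]
    apply ih (pvStepA d s) (max m (PySem.Str.strip s).toList.length)
    rw [pv_stepA_keys, h, show PySem.Str.len (PySem.Str.strip s) = (((PySem.Str.strip s).toList.length : Nat) : Int) by simp]
    exact pv_set_update_range m _

lemma pv_outer_nodup :
    ∀ (l : List String) (d : PySem.Dict Int (List Int)), d.keys.Nodup → (l.foldl pvStepA d).keys.Nodup := by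
  intro l
  induction l with
  | nil => intro d h; simpa using h
  | cons s t ih =>
    intro d h
    simp only [List.foldl_cons]
    exact ih (pvStepA d s) (pv_stepA_nodup d s h)

-- index ≠ -1: A's dict stays the singleton {index: [zeros, ones]}
def pvStepI (index : Int) (d : PySem.Dict Int (List Int)) (s : String) : PySem.Dict Int (List Int) :=
  d.insert index (pvBump (d.getD index [0, 0]) (PySem.Str.pyGet? (PySem.Str.strip s) index == some '0'))

def pvPairStep (index : Int) (p : Int × Int) (s : String) : Int × Int :=
  if PySem.Str.pyGet? (PySem.Str.strip s) index == some '0' then (p.1 + 1, p.2) else (p.1, p.2 + 1)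

lemma pv_singleton_insert (index : Int) (v w : List Int) :
    (PySem.Dict.mk [(index, v)]).insert index w = PySem.Dict.mk [(index, w)] := by
  apply PySem.Dict.ext
  simp [PySem.Dict.items_insert]

lemma pv_singleton_getD (index : Int) (v : List Int) :
    (PySem.Dict.mk [(index, v)]).getD index [0, 0] = v := by
  rw [PySem.Dict.getD_eq_get?_getD, PySem.Dict.get?_mk_cons]
  simp

lemma pv_idx_fold (index : Int) :
    ∀ (l : List String) (z o : Int),
      l.foldl (pvStepI index) (PySem.Dict.mk [(index, [z, o])])
      = PySem.Dict.mk [(index, [(l.foldl (pvPairStep index) (z, o)).1, (l.foldl (pvPairStep index) (z, o)).2])] := by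
  intro l
  induction l with
  | nil => intro z o; simp
  | cons s t ih =>
    intro z o
    simp only [List.foldl_cons]
    rw [show pvStepI index (PySem.Dict.mk [(index, [z, o])]) s
        = PySem.Dict.mk [(index, pvBump [z, o] (PySem.Str.pyGet? (PySem.Str.strip s) index == some '0'))] by
      rw [pvStepI, pv_singleton_getD, pv_singleton_insert]]
    by_cases hc : (PySem.Str.pyGet? (PySem.Str.strip s) index == some '0') = true
    · rw [pvBump_pair, if_pos hc, ih (z + 1) o, show pvPairStep index (z, o) s = (z + 1, o) by rw [pvPairStep, if_pos hc]]
    · rw [pvBump_pair, if_neg hc, ih z (o + 1), show pvPairStep index (z, o) s = (z, o + 1) by rw [pvPairStep, if_neg hc]]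


lemma pv_empty_insert (index : Int) (v : List Int) :
    PySem.Dict.empty.insert index v = PySem.Dict.mk [(index, v)] := by
  apply PySem.Dict.ext
  simp [PySem.Dict.items_insert, PySem.Dict.empty]

lemma pv_PZ_eq (j : Nat) (s : String) :
    pvPZ (j : Int) s
    = (decide (j < (PySem.Str.strip s).toList.length) && (PySem.Str.pyGet? (PySem.Str.strip s) (j : Int) == some '0')) := by
  simp [pvPZ]

lemma pv_PO_eq (j : Nat) (s : String) :
    pvPO (j : Int) s
    = (decide (j < (PySem.Str.strip s).toList.length) && !(PySem.Str.pyGet? (PySem.Str.strip s) (j : Int) == some '0')) := by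
  simp [pvPO]


-- ===== VERDICT (by name: the statement is the Claim_ definition above) =====
set_option maxHeartbeats 2000000 in
theorem get_bit_counts_spec : Claim_equal_get_bit_counts := by
  intro strings index hdom hpre
  unfold Spec_get_bit_counts get_bit_counts get_bit_counts_alt
  by_cases hidx : index = -1
  · subst hidx
    have hf : (fun (d : PySem.Dict Int (List Int)) (string : String) =>
        let b := PySem.Str.strip string
        if (-1 : Int) = -1 then
          (PySem.List.pyRange 0 (PySem.Str.len b) 1).foldl
            (fun d j => d.insert j (pvBump (d.getD j [0, 0]) (PySem.Str.pyGet? b j == some '0'))) d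
        else
          d.insert (-1) (pvBump (d.getD (-1) [0, 0]) (PySem.Str.pyGet? b (-1) == some '0')))
        = pvStepA := by
      funext d s; simp [pvStepA]
    rw [hf]
    rw [if_neg (by simp)]
    set M : Nat := strings.foldl (fun acc s => max acc (PySem.Str.strip s).toList.length) 0 with hM
    have hnodup : (strings.foldl pvStepA PySem.Dict.empty).keys.Nodup :=
      pv_outer_nodup strings PySem.Dict.empty (by simp [PySem.Dict.empty, PySem.Dict.keys])
    have hkeys : (strings.foldl pvStepA PySem.Dict.empty).keys = PySem.List.pyRange 0 (M : Int) 1 := by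
      rw [hM]
      exact pv_outer_keys strings PySem.Dict.empty 0
        (by rw [show ((0 : Nat) : Int) = 0 by simp, PySem.List.pyRange_one_eq_nil le_rfl]
            simp [PySem.Dict.empty, PySem.Dict.keys])
    have hgetD : ∀ j : Int, (strings.foldl pvStepA PySem.Dict.empty).getD j [0, 0]
        = [pvZ strings j, pvO strings j] := by
      intro j
      have h0 : PySem.Dict.empty.getD j ([0, 0] : List Int) = [0, 0] := by
        simp [PySem.Dict.getD_eq_get?_getD, PySem.Dict.get?_empty]
      have := pv_outer_getD j strings PySem.Dict.empty 0 0 h0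
      simpa using this
    rw [PySem.Dict.items_eq_map_keys _ hnodup [0, 0], hkeys]
    have hmax : (strings.map PySem.Str.strip).foldl (fun m s => max m s.toList.length) 0 = M := by
      rw [List.foldl_map]
    rw [hmax]
    rw [PySem.List.pyRange_zero_nat]
    simp only [List.map_map]
    apply List.map_congr_left
    intro j hj
    simp only [Function.comp_apply]
    rw [hgetD]
    have hz : pvZ strings (j : Int)
        = (((strings.map PySem.Str.strip).filter
            (fun s => decide (j < s.toList.length) && (PySem.Str.pyGet? s (j : Int) == some '0'))).length : Int) := by
      rw [List.filter_map, List.length_map, ← List.countP_eq_length_filter]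
      unfold pvZ
      rw [Nat.cast_inj]
      apply List.countP_congr
      intro s _
      rw [pv_PZ_eq]
      rfl
    have ho : pvO strings (j : Int)
        = (((strings.map PySem.Str.strip).filter
            (fun s => decide (j < s.toList.length) && !(PySem.Str.pyGet? s (j : Int) == some '0'))).length : Int) := by
      rw [List.filter_map, List.length_map, ← List.countP_eq_length_filter]
      unfold pvO
      rw [Nat.cast_inj]
      apply List.countP_congr
      intro s _
      rw [pv_PO_eq]
      rfl
    rw [hz, ho]
  · have hf : (fun (d : PySem.Dict Int (List Int)) (string : String) =>
        let b := PySem.Str.strip string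
        if index = -1 then
          (PySem.List.pyRange 0 (PySem.Str.len b) 1).foldl
            (fun d j => d.insert j (pvBump (d.getD j [0, 0]) (PySem.Str.pyGet? b j == some '0'))) d
        else
          d.insert index (pvBump (d.getD index [0, 0]) (PySem.Str.pyGet? b index == some '0')))
        = pvStepI index := by
      funext d s; simp [pvStepI, hidx]
    rw [hf]
    rw [if_pos hidx]
    cases strings with
    | nil => simp [PySem.Dict.empty]
    | cons s t =>
      simp only [List.foldl_cons, List.map_cons, List.isEmpty_cons]
      have hstep : pvStepI index PySem.Dict.empty s
          = PySem.Dict.mk [(index, pvBump [0, 0] (PySem.Str.pyGet? (PySem.Str.strip s) index == some '0'))] := by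
        rw [pvStepI]
        rw [show PySem.Dict.empty.getD index ([0, 0] : List Int) = [0, 0] by
          simp [PySem.Dict.getD_eq_get?_getD, PySem.Dict.get?_empty]]
        exact pv_empty_insert _ _
      rw [hstep]
      have hfoldBmap : ∀ (p : Int × Int),
          (t.map PySem.Str.strip).foldl
            (fun (p : Int × Int) s =>
              if PySem.Str.pyGet? s index == some '0' then (p.1 + 1, p.2) else (p.1, p.2 + 1)) p
          = t.foldl (pvPairStep index) p := by
        intro p
        rw [List.foldl_map]
        rfl
      by_cases hc : (PySem.Str.pyGet? (PySem.Str.strip s) index == some '0') = true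
      · rw [pvBump_pair, if_pos hc, show ((0 : Int) + 1) = 1 by ring,
            pv_idx_fold index t 1 0, if_pos hc, hfoldBmap]
        rfl
      · rw [pvBump_pair, if_neg hc, show ((0 : Int) + 1) = 1 by ring,
            pv_idx_fold index t 0 1, if_neg hc, hfoldBmap]
        rfl
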